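-- pv_equiv track=rewrite | github.com/leen-cell/Cryptography-tasks | task1_keystream_attack.py | key_stream
-- ===== SOURCE A (Python) =====
-- def key_stream (ciphertexts, guessed_plaintexts):
--     max_len = max(len(c) for c in ciphertexts)
--     keystream = [None] * max_len
--
--     for i, guessed in enumerate(guessed_plaintexts):
--         for k in range(min(len(ciphertexts[i]), len(guessed))):
--             char = guessed[k]
--             if char != '.':
--                 keystream[k] = ciphertexts[i][k] ^ ord(char)
--
--     return keystream
-- ===== SOURCE B (Python) =====
-- def key_stream(ciphertexts, guessed_plaintexts):
--     max_len = max(len(c) for c in ciphertexts)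
--
--     def byte_at(k):
--         # last writer wins in A, so the first match scanning backwards wins here
--         for i in range(len(guessed_plaintexts) - 1, -1, -1):
--             g = guessed_plaintexts[i]
--             if k < len(g) and k < len(ciphertexts[i]) and g[k] != '.':
--                 return ciphertexts[i][k] ^ ord(g[k])
--         return None
--
--     return [byte_at(k) for k in range(max_len)]
-- ===== Notes on version B (the rewrite author's own statement) =====
-- stated objective: alternative
-- what changed: B builds the keystream column-major: for each position k it scans the guesses in reverse and takes the first revealing byte (matching A's last-writer-wins overwrite), instead of A's guess-outer loop mutating a preallocated array.
-- outside the precondition, e.g. on key_stream([], []): A raises ValueError, B raises ValueError; on key_stream([[1]], ['a', 'b']): A raises IndexError, B raises IndexError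
import Mathlib
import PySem

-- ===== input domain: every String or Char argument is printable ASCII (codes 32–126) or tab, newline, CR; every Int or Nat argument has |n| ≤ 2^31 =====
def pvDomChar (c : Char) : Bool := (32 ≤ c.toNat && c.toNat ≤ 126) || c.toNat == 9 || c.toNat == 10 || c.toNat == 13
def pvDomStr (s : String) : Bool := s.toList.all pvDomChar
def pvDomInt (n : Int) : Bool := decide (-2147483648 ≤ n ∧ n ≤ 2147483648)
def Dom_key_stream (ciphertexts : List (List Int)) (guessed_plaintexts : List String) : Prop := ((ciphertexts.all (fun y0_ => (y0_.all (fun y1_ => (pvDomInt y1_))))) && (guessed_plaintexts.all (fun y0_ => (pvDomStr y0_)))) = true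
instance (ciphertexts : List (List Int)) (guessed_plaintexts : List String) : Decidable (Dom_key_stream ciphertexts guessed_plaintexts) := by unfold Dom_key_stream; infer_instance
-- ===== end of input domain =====

-- B rebuilds the keystream column-major (reverse first-match per position) instead of A's
-- guess-outer loop that overwrites a preallocated array; alternative decomposition, same cost class.
-- ===== PORT A =====
-- inner 'for k in range(min(len(ciphertexts[i]), len(guessed)))' loop of A
def aInner (row : List Int) (g : List Char) (ks : List (Option Int)) : List (Option Int) :=
  (List.range (min row.length g.length)).foldl (fun ks k =>
    let char := g.getD k '.'
    if char ≠ '.' then ks.set k (some (PySem.Int.bxor (row.getD k 0) (char.toNat : Int)))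
    else ks) ks

def key_stream (ciphertexts : List (List Int)) (guessed_plaintexts : List String) : List (Option Int) :=
  match PySem.List.max? (ciphertexts.map (fun c => (c.length : Int))) (fun x => x) with
  | none => []  -- Python raises ValueError here (max of empty); excluded by Pre_
  | some m =>
    -- keystream = [None] * max_len, then the guess-outer loop (ciphertexts[i] raises when
    -- i is out of range — excluded by Pre_; the port uses the empty row there)
    (PySem.List.enumerate guessed_plaintexts 0).foldl
      (fun ks p => aInner ((PySem.List.pyGet? ciphertexts p.1).getD []) p.2.toList ks)
      (List.replicate m.toNat (none : Option Int))

-- ===== PORT B =====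
-- byte_at's reverse scan: first (i, guessed) pair revealing position k, or None
def bScan (ciphertexts : List (List Int)) (pairs : List (Int × String)) (k : Nat) : Option Int :=
  match pairs with
  | [] => none
  | (i, g) :: rest =>
    let gl := g.toList
    let row := (PySem.List.pyGet? ciphertexts i).getD []
    if k < gl.length ∧ k < row.length ∧ gl.getD k '.' ≠ '.' then
      some (PySem.Int.bxor (row.getD k 0) ((gl.getD k '.').toNat : Int))
    else bScan ciphertexts rest k

def key_stream_alt (ciphertexts : List (List Int)) (guessed_plaintexts : List String) : List (Option Int) :=
  match PySem.List.max? (ciphertexts.map (fun c => (c.length : Int))) (fun x => x) with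
  | none => []  -- Python raises ValueError here (max of empty); excluded by Pre_
  | some m =>
    (List.range m.toNat).map
      (fun k => bScan ciphertexts (PySem.List.enumerate guessed_plaintexts 0).reverse k)

-- ===== PRECONDITION & SPEC =====
-- Pre_ excludes exactly the inputs on which A raises: max() of an empty ciphertext list
-- (ValueError) and guess lists longer than the ciphertext list (IndexError on ciphertexts[i]).
def Pre_key_stream (ciphertexts : List (List Int)) (guessed_plaintexts : List String) : Prop :=
  ciphertexts ≠ [] ∧ guessed_plaintexts.length ≤ ciphertexts.length
instance (ciphertexts : List (List Int)) (guessed_plaintexts : List String) : Decidable (Pre_key_stream ciphertexts guessed_plaintexts) := by unfold Pre_key_stream; infer_instance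
def pvWitness_key_stream : List (List Int) × List String := ([[1, 200], [5]], ["a."])

def Spec_key_stream (ciphertexts : List (List Int)) (guessed_plaintexts : List String) (out : List (Option Int)) : Prop := out = key_stream_alt ciphertexts guessed_plaintexts
instance (ciphertexts : List (List Int)) (guessed_plaintexts : List String) (out : List (Option Int)) : Decidable (Spec_key_stream ciphertexts guessed_plaintexts out) := by unfold Spec_key_stream; infer_instance

-- ===== CLAIM (what is proved, stated in full; the proofs are below) =====
def Claim_equal_key_stream : Prop := ∀ (ciphertexts : List (List Int)) (guessed_plaintexts : List String), Dom_key_stream ciphertexts guessed_plaintexts → Pre_key_stream ciphertexts guessed_plaintexts → Spec_key_stream ciphertexts guessed_plaintexts (key_stream ciphertexts guessed_plaintexts)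

-- ===== LEMMAS AND PROOFS =====

theorem stepFoldl_length (row : List Int) (g : List Char) (l : List Nat) :
    ∀ ks : List (Option Int),
      (l.foldl (fun ks k =>
        let char := g.getD k '.'
        if char ≠ '.' then ks.set k (some (PySem.Int.bxor (row.getD k 0) (char.toNat : Int)))
        else ks) ks).length = ks.length := by
  induction l with
  | nil => intro ks; rfl
  | cons x t ih =>
    intro ks
    simp only [List.foldl_cons]
    rw [ih]
    show (if g.getD x '.' ≠ '.' then ks.set x (some (PySem.Int.bxor (row.getD x 0) ((g.getD x '.').toNat : Int))) else ks).length = ks.length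
    split <;> simp

theorem aInner_length (row : List Int) (g : List Char) (ks : List (Option Int)) :
    (aInner row g ks).length = ks.length := by
  unfold aInner; exact stepFoldl_length row g _ ks

theorem aInner_getD_aux (row : List Int) (g : List Char) :
    ∀ (n : Nat) (ks : List (Option Int)) (k : Nat), n ≤ g.length → n ≤ ks.length →
      ((List.range n).foldl (fun ks k =>
        let char := g.getD k '.'
        if char ≠ '.' then ks.set k (some (PySem.Int.bxor (row.getD k 0) (char.toNat : Int)))
        else ks) ks).getD k none =
      if k < n ∧ g.getD k '.' ≠ '.' then
        some (PySem.Int.bxor (row.getD k 0) ((g.getD k '.').toNat : Int))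
      else ks.getD k none := by
  intro n
  induction n with
  | zero => intro ks k _ _; simp
  | succ n ih =>
    intro ks k hg hk
    rw [List.range_succ, List.foldl_append, List.foldl_cons, List.foldl_nil]
    have hlen : (List.foldl (fun ks k =>
        if g.getD k '.' ≠ '.' then ks.set k (some (PySem.Int.bxor (row.getD k 0) ((g.getD k '.').toNat : Int)))
        else ks) ks (List.range n)).length = ks.length := stepFoldl_length row g _ ks
    have ihn := fun k => ih ks k (by omega) (by omega)
    dsimp only
    by_cases hc : g.getD n '.' ≠ '.'
    · rw [if_pos hc]
      rcases Nat.lt_trichotomy k n with h | h | h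
      · rw [List.getD_eq_getElem?_getD, List.getElem?_set_ne (by omega),
          ← List.getD_eq_getElem?_getD, ihn k]
        by_cases hck : g.getD k '.' ≠ '.' <;> simp [h, Nat.lt_succ_of_lt h]
      · rw [h, List.getD_eq_getElem?_getD,
          List.getElem?_set_eq_of_lt _ (by omega : n < _)]
        have hc' : g[n]?.getD '.' ≠ '.' := by
          rw [← List.getD_eq_getElem?_getD]; exact hc
        simp [hc']
      · rw [List.getD_eq_getElem?_getD, List.getElem?_set_ne (by omega),
          ← List.getD_eq_getElem?_getD, ihn k]
        have h1 : ¬ k < n := by omega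
        have h2 : ¬ k < n + 1 := by omega
        simp [h1, h2]
    · rw [if_neg hc]
      rw [ihn k]
      by_cases hck : k = n
      · subst hck; simp at hc; simp [hc]
      · have : (k < n + 1 ∧ ¬ g.getD k '.' = '.') ↔ (k < n ∧ ¬ g.getD k '.' = '.') := by
          constructor
          · rintro ⟨h1, h2⟩
            refine ⟨?_, h2⟩
            omega
          · rintro ⟨h1, h2⟩; exact ⟨by omega, h2⟩
        simp only [ne_eq]
        rw [if_congr this rfl rfl]

theorem aInner_getD (row : List Int) (g : List Char) (ks : List (Option Int)) (k : Nat)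
    (hrow : row.length ≤ ks.length) :
    (aInner row g ks).getD k none =
      if k < g.length ∧ k < row.length ∧ g.getD k '.' ≠ '.' then
        some (PySem.Int.bxor (row.getD k 0) ((g.getD k '.').toNat : Int))
      else ks.getD k none := by
  unfold aInner
  have := aInner_getD_aux row g (min row.length g.length) ks k (by omega) (by omega)
  rw [this]
  by_cases h1 : k < g.length <;> by_cases h2 : k < row.length <;>
    · by_cases h3 : g.getD k '.' ≠ '.' <;>
        simp [h1, h2, and_comm]

theorem bScan_append (ct : List (List Int)) (l l' : List (Int × String)) (k : Nat) :
    bScan ct (l ++ l') k = (bScan ct l k).elim (bScan ct l' k) some := by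
  induction l with
  | nil => rfl
  | cons p t ih =>
    obtain ⟨i, g⟩ := p
    simp only [List.cons_append, bScan]
    split
    · rfl
    · exact ih

theorem foldl_eq_bScan (ct : List (List Int)) (pairs : List (Int × String))
    (ks : List (Option Int)) (k : Nat)
    (hks : ∀ i : Int, ((PySem.List.pyGet? ct i).getD []).length ≤ ks.length) :
    (pairs.foldl (fun ks p => aInner ((PySem.List.pyGet? ct p.1).getD []) p.2.toList ks) ks).getD k none
      = (bScan ct pairs.reverse k).elim (ks.getD k none) some := by
  induction pairs generalizing ks with
  | nil => simp [bScan]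
  | cons p rest ih =>
    obtain ⟨i, g⟩ := p
    simp only [List.foldl_cons, List.reverse_cons]
    rw [ih _ (fun j => by rw [aInner_length]; exact hks j), bScan_append]
    rw [aInner_getD _ _ _ _ (hks i)]
    cases bScan ct rest.reverse k with
    | some v => rfl
    | none =>
      simp only [Option.elim]
      show _ = (bScan ct [(i, g)] k).elim (ks.getD k none) some
      simp only [bScan]
      split <;> rfl

theorem foldlA_length (ct : List (List Int)) (pairs : List (Int × String)) :
    ∀ ks : List (Option Int),
      (pairs.foldl (fun ks p => aInner ((PySem.List.pyGet? ct p.1).getD []) p.2.toList ks) ks).length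
        = ks.length := by
  induction pairs with
  | nil => intro ks; rfl
  | cons p rest ih => intro ks; rw [List.foldl_cons, ih, aInner_length]

-- ===== VERDICT (by name: the statement is the Claim_ definition above) =====
theorem key_stream_spec : Claim_equal_key_stream := by
  intro ct gs _ _
  unfold Spec_key_stream key_stream key_stream_alt
  cases h : PySem.List.max? (ct.map (fun c => (c.length : Int))) (fun x => x) with
  | none => rfl
  | some m =>
    have hks : ∀ i : Int, ((PySem.List.pyGet? ct i).getD []).length ≤
        (List.replicate m.toNat (none : Option Int)).length := by
      intro i
      cases hg : PySem.List.pyGet? ct i with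
      | none => simp
      | some r =>
        have hr : r ∈ ct := PySem.List.mem_of_pyGet?_eq_some ct hg
        have : ((r.length : Int)) ≤ m :=
          PySem.List.max?_isMax h ((r.length : Int)) (List.mem_map_of_mem hr)
        simp only [Option.getD_some, List.length_replicate]
        omega
    apply List.ext_getElem
    · rw [foldlA_length]
      simp
    · intro k hk1 hk2
      rw [← List.getD_eq_getElem _ none, foldl_eq_bScan ct _ _ k hks]
      have hkm : k < m.toNat := by
        rw [foldlA_length, List.length_replicate] at hk1
        exact hk1
      rw [List.getD_eq_getElem _ none (by simpa using hkm), List.getElem_replicate]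
      rw [List.getElem_map, List.getElem_range]
      cases bScan ct (PySem.List.enumerate gs 0).reverse k <;> rfl
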